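-- pv_equiv track=rewrite | github.com/mikami520/AutoSeg4SinonasalCT | deepatlas/preprocess/process_data.py | take_data_pairs
-- ===== SOURCE A (Python) =====
-- def take_data_pairs(data, symmetric=True):
--     """Given a list of dicts that have keys for an image and maybe a segmentation,
--     return a list of dicts corresponding to *pairs* of images and maybe segmentations.
--     Pairs consisting of a repeated image are not included.
--     If symmetric is set to True, then for each pair that is included, its reverse is also included"""
--     data_pairs = []
--     for i in range(len(data)):
--         j_limit = len(data) if symmetric else i
--         for j in range(j_limit):
--             if j == i:
--                 continue
--             d1 = data[i]
--             d2 = data[j]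
--             pair = {
--                 'img1': d1['img'],
--                 'img2': d2['img']
--             }
--             if 'seg' in d1.keys():
--                 pair['seg1'] = d1['seg']
--             if 'seg' in d2.keys():
--                 pair['seg2'] = d2['seg']
--             data_pairs.append(pair)
--     return data_pairs
-- ===== SOURCE B (Python) =====
-- def take_data_pairs(data, symmetric=True):
--     """Index-free zipper pass: walk the list once keeping the already-visited
--     prefix; each record is paired with the prefix (and, if symmetric, also the
--     remaining suffix) by list concatenation, so there is no index arithmetic
--     and no j == i skip test."""
--     def make(d, s):
--         pair = {'img1': d['img'], 'img2': s['img']}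
--         if 'seg' in d:
--             pair['seg1'] = d['seg']
--         if 'seg' in s:
--             pair['seg2'] = s['seg']
--         return pair
--
--     out = []
--     prefix = []
--     suffix = list(data)
--     while suffix:
--         d = suffix.pop(0)
--         for s in (prefix + suffix) if symmetric else prefix:
--             out.append(make(d, s))
--         prefix.append(d)
--     return out
-- ===== Notes on version B (the rewrite author's own statement) =====
-- stated objective: alternative
-- what changed: B replaces A's double index loop with its j==i skip test by a single index-free zipper pass: it walks the list once keeping the visited prefix and pairs each record with prefix+suffix (symmetric) or just the prefix (non-symmetric) by list concatenation.
import Mathlib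
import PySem

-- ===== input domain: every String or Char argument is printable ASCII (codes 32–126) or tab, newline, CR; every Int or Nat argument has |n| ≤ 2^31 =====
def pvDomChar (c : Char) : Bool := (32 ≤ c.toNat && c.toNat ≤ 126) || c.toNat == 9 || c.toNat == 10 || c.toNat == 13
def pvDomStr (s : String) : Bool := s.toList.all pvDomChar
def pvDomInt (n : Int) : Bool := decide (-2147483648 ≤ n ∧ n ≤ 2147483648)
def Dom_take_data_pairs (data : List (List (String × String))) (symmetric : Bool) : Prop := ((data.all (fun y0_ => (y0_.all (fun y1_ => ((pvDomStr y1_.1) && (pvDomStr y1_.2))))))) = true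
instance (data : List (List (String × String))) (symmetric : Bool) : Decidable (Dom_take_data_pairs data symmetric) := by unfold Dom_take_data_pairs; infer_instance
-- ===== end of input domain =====

-- B replaces A's double index loop (with its j == i skip test) by a single
-- index-free zipper pass over the list (objective: alternative decomposition, same cost).

-- ===== PORT A =====
-- the pair dict A's inner loop builds for (d1, d2), step for step
def pvPairA (d1 d2 : PySem.Dict String String) : List (String × String) :=
  let pair := (PySem.Dict.empty.insert "img1" (d1.getD "img" "")).insert "img2" (d2.getD "img" "")
  let pair := if d1.contains "seg" then pair.insert "seg1" (d1.getD "seg" "") else pair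
  let pair := if d2.contains "seg" then pair.insert "seg2" (d2.getD "seg" "") else pair
  pair.items

def take_data_pairs (data : List (List (String × String))) (symmetric : Bool) : List (List (String × String)) :=
  (PySem.List.pyRange 0 data.length 1).foldl (fun data_pairs i =>
    let j_limit : Int := if symmetric then (data.length : Int) else i
    (PySem.List.pyRange 0 j_limit 1).foldl (fun data_pairs j =>
      if j = i then data_pairs
      else
        -- d1['img'] / d2['img'] : the missing-'img' KeyError case is excluded by Pre_
        data_pairs ++ [pvPairA (PySem.Dict.ofList (PySem.List.pyGetD data i []))
                               (PySem.Dict.ofList (PySem.List.pyGetD data j []))]) data_pairs) []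

-- ===== PORT B =====
-- B's `make`: assemble one output dict from the two records
def pvMakeB (d s : List (String × String)) : List (String × String) :=
  let dd := PySem.Dict.ofList d
  let ds := PySem.Dict.ofList s
  let pair := (PySem.Dict.empty.insert "img1" (dd.getD "img" "")).insert "img2" (ds.getD "img" "")
  let pair := if dd.contains "seg" then pair.insert "seg1" (dd.getD "seg" "") else pair
  let pair := if ds.contains "seg" then pair.insert "seg2" (ds.getD "seg" "") else pair
  pair.items

-- B's while-loop: suffix shrinks (suffix.pop(0)), prefix and out grow
def pvGo (symmetric : Bool) (pre out : List (List (String × String))) :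
    List (List (String × String)) → List (List (String × String))
  | [] => out
  | d :: suffix =>
      let partners := if symmetric then pre ++ suffix else pre
      pvGo symmetric (pre ++ [d]) (out ++ partners.map (fun s => pvMakeB d s)) suffix

def take_data_pairs_alt (data : List (List (String × String))) (symmetric : Bool) : List (List (String × String)) :=
  pvGo symmetric [] [] data

-- ===== PRECONDITION & SPEC =====
-- A raises KeyError on d['img'] iff the list has ≥ 2 records and some record lacks an
-- 'img' key (with ≤ 1 record no record is ever accessed); B raises there as well.
def Pre_take_data_pairs (data : List (List (String × String))) (symmetric : Bool) : Prop :=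
  data.length ≤ 1 ∨ ∀ d ∈ data, (PySem.Dict.ofList d).contains "img" = true
instance (data : List (List (String × String))) (symmetric : Bool) : Decidable (Pre_take_data_pairs data symmetric) := by unfold Pre_take_data_pairs; infer_instance
def pvWitness_take_data_pairs : (List (List (String × String))) × Bool :=
  ([[("img", "a"), ("seg", "sa")], [("img", "b")]], true)

def Spec_take_data_pairs (data : List (List (String × String))) (symmetric : Bool) (out : List (List (String × String))) : Prop := out = take_data_pairs_alt data symmetric
instance (data : List (List (String × String))) (symmetric : Bool) (out : List (List (String × String))) : Decidable (Spec_take_data_pairs data symmetric out) := by unfold Spec_take_data_pairs; infer_instance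

-- ===== CLAIM (what is proved, stated in full; the proofs are below) =====
def Claim_equal_take_data_pairs : Prop := ∀ (data : List (List (String × String))) (symmetric : Bool), Dom_take_data_pairs data symmetric → Pre_take_data_pairs data symmetric → Spec_take_data_pairs data symmetric (take_data_pairs data symmetric)

-- ===== LEMMAS AND PROOFS =====

-- A's row for index i, as a function of the full list
def pvRowA (data : List (List (String × String))) (symmetric : Bool) (i : Int) : List (List (String × String)) :=
  (PySem.List.pyRange 0 (if symmetric then (data.length : Int) else i) 1).flatMap
    (fun j => if j = i then []
      else [pvPairA (PySem.Dict.ofList (PySem.List.pyGetD data i []))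
                    (PySem.Dict.ofList (PySem.List.pyGetD data j []))])

-- A's inner loop: conditional append as flatMap
theorem pvInner {α β : Type} [DecidableEq β] (L : List β) (i : β) (g : β → α) (acc : List α) :
    L.foldl (fun dp j => if j = i then dp else dp ++ [g j]) acc
      = acc ++ L.flatMap (fun j => if j = i then [] else [g j]) := by
  induction L generalizing acc with
  | nil => simp
  | cons x xs ih =>
    simp only [List.foldl_cons, List.flatMap_cons]
    by_cases hx : x = i
    · simp [hx, ih]
    · simp [hx, ih]

-- A's double loop as a flatMap of rows
theorem pvOuter (data : List (List (String × String))) (symmetric : Bool) (L : List Int)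
    (acc : List (List (String × String))) :
    L.foldl (fun dp i =>
      (PySem.List.pyRange 0 (if symmetric then (data.length : Int) else i) 1).foldl
        (fun dp j => if j = i then dp
          else dp ++ [pvPairA (PySem.Dict.ofList (PySem.List.pyGetD data i []))
                              (PySem.Dict.ofList (PySem.List.pyGetD data j []))]) dp) acc
      = acc ++ L.flatMap (fun i => pvRowA data symmetric i) := by
  induction L generalizing acc with
  | nil => simp
  | cons x xs ih =>
    simp only [List.foldl_cons, List.flatMap_cons]
    rw [pvInner, ih, List.append_assoc, pvRowA]

-- fetching then pairing = pairing over the fetched records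
theorem pvMapFetch (xs : List (List (String × String))) (c : List (String × String)) (L : List Int) :
    L.map (fun j => pvPairA (PySem.Dict.ofList c) (PySem.Dict.ofList (PySem.List.pyGetD xs j [])))
      = (L.map (fun j => PySem.List.pyGetD xs j [])).map (fun s => pvMakeB c s) := by
  rw [List.map_map]; rfl

-- mapping the fetch over range(0, k) reads the first k records
theorem pvMapTake (xs : List (List (String × String))) (k : Nat) (hk : k ≤ xs.length) :
    (PySem.List.pyRange 0 (k : Int) 1).map (fun j => PySem.List.pyGetD xs j []) = xs.take k := by
  induction k with
  | zero => simp
  | succ m ih =>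
    have h1 : ((m : Int) + 1) = ((m + 1 : Nat) : Int) := by push_cast; ring
    rw [← h1, PySem.List.pyRange_one_succ_right (by positivity), List.map_append, ih (by omega)]
    have hm : m < xs.length := by omega
    have hget : PySem.List.pyGetD xs ((m : Nat) : Int) [] = xs[m] := by
      rw [PySem.List.pyGetD_natCast]; simp [List.getD, List.getElem?_eq_getElem hm]
    rw [← List.take_append_getElem hm]
    simp [hget]

-- A's row at index k equals B's partner row: prefix (++ suffix when symmetric)
theorem pvRow_eq (pre suf : List (List (String × String))) (d : List (String × String))
    (symmetric : Bool) :
    pvRowA (pre ++ d :: suf) symmetric (pre.length : Int)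
      = ((if symmetric then pre ++ suf else pre).map (fun s => pvMakeB d s)) := by
  have hget : PySem.List.pyGetD (pre ++ d :: suf) (pre.length : Int) [] = d := by
    rw [PySem.List.pyGetD_natCast]
    simp [List.getD]
  have hne : ∀ j ∈ PySem.List.pyRange 0 (pre.length : Int) 1, j ≠ (pre.length : Int) := by
    intro j hj
    have := (PySem.List.mem_pyRange_one.mp hj).2
    omega
  have hpref :
      (PySem.List.pyRange 0 (pre.length : Int) 1).flatMap
        (fun j => if j = (pre.length : Int) then []
          else [pvPairA (PySem.Dict.ofList (PySem.List.pyGetD (pre ++ d :: suf) (pre.length : Int) []))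
                        (PySem.Dict.ofList (PySem.List.pyGetD (pre ++ d :: suf) j []))])
        = pre.map (fun s => pvMakeB d s) := by
    rw [List.flatMap_congr (g := fun j =>
        [pvPairA (PySem.Dict.ofList (PySem.List.pyGetD (pre ++ d :: suf) (pre.length : Int) []))
                 (PySem.Dict.ofList (PySem.List.pyGetD (pre ++ d :: suf) j []))])
        (fun j hj => by rw [if_neg (hne j hj)])]
    rw [hget, ← List.map_eq_flatMap, pvMapFetch,
        pvMapTake _ pre.length (by simp), List.take_left]
  unfold pvRowA
  cases symmetric with
  | false =>
    simpa using hpref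
  | true =>
    simp only [if_true]
    have hk : (0 : Int) ≤ (pre.length : Int) := by positivity
    have hkn : (pre.length : Int) ≤ ((pre ++ d :: suf).length : Int) := by
      simp [List.length_append]; try omega
    rw [PySem.List.pyRange_one_append 0 (pre.length : Int) _ hk hkn, List.flatMap_append, hpref]
    have hlt : (pre.length : Int) < ((pre ++ d :: suf).length : Int) := by
      simp [List.length_append]; try omega
    rw [PySem.List.pyRange_one_cons hlt, List.flatMap_cons, if_pos rfl, List.nil_append]
    have hne' : ∀ j ∈ PySem.List.pyRange ((pre.length : Int) + 1) ((pre ++ d :: suf).length : Int) 1,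
        j ≠ (pre.length : Int) := by
      intro j hj
      have := (PySem.List.mem_pyRange_one.mp hj).1
      omega
    rw [List.flatMap_congr (g := fun j =>
        [pvPairA (PySem.Dict.ofList (PySem.List.pyGetD (pre ++ d :: suf) (pre.length : Int) []))
                 (PySem.Dict.ofList (PySem.List.pyGetD (pre ++ d :: suf) j []))])
        (fun j hj => by rw [if_neg (hne' j hj)])]
    rw [hget, ← List.map_eq_flatMap, pvMapFetch]
    have hdrop : (PySem.List.pyRange ((pre.length : Int) + 1) ((pre ++ d :: suf).length : Int) 1).map
        (fun j => PySem.List.pyGetD (pre ++ d :: suf) j []) = suf := by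
      rw [PySem.List.map_pyGetD_pyRange']
      · have ht : (((pre.length : Int) + 1)).toNat = pre.length + 1 := by omega
        rw [ht, show pre ++ d :: suf = (pre ++ [d]) ++ suf by simp,
            show pre.length + 1 = (pre ++ [d]).length by simp, List.drop_left]
      · omega
    rw [hdrop, List.map_append]

-- the zipper pass, with its accumulator pulled out
theorem pvGo_out (symmetric : Bool) (suf pre out : List (List (String × String))) :
    pvGo symmetric pre out suf = out ++ pvGo symmetric pre [] suf := by
  induction suf generalizing pre out with
  | nil => simp [pvGo]
  | cons d tl ih =>
    simp only [pvGo]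
    rw [ih, ih (out := [] ++ _), List.nil_append, List.append_assoc]

-- the flatMap of A's rows over the index range of the suffix is B's zipper pass
theorem pvMain (symmetric : Bool) (suf pre : List (List (String × String))) :
    (PySem.List.pyRange (pre.length : Int) ((pre ++ suf).length : Int) 1).flatMap
        (fun i => pvRowA (pre ++ suf) symmetric i)
      = pvGo symmetric pre [] suf := by
  induction suf generalizing pre with
  | nil =>
    rw [List.append_nil, PySem.List.pyRange_one_eq_nil le_rfl]
    rfl
  | cons d tl ih =>
    have hlt : (pre.length : Int) < ((pre ++ d :: tl).length : Int) := by
      simp [List.length_append]; try omega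
    rw [PySem.List.pyRange_one_cons hlt, List.flatMap_cons]
    have hshift : (pre.length : Int) + 1 = (((pre ++ [d]).length : Nat) : Int) := by
      simp [List.length_append]
    have hassoc : pre ++ d :: tl = (pre ++ [d]) ++ tl := by simp
    rw [pvRow_eq pre tl d symmetric]
    calc ((if symmetric then pre ++ tl else pre).map (fun s => pvMakeB d s)) ++
          (PySem.List.pyRange ((pre.length : Int) + 1) ((pre ++ d :: tl).length : Int) 1).flatMap
            (fun i => pvRowA (pre ++ d :: tl) symmetric i)
        = ((if symmetric then pre ++ tl else pre).map (fun s => pvMakeB d s)) ++ pvGo symmetric (pre ++ [d]) [] tl := by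
          rw [hshift]
          conv_lhs => rw [hassoc]
          rw [ih (pre ++ [d])]
      _ = pvGo symmetric pre [] (d :: tl) := by
          conv_rhs => rw [pvGo, pvGo_out]
          simp

theorem take_data_pairs_eq_alt (data : List (List (String × String))) (symmetric : Bool) :
    take_data_pairs data symmetric = take_data_pairs_alt data symmetric := by
  unfold take_data_pairs take_data_pairs_alt
  rw [pvOuter, List.nil_append]
  have := pvMain symmetric data []
  simpa using this

-- ===== VERDICT (by name: the statement is the Claim_ definition above) =====
theorem take_data_pairs_spec : Claim_equal_take_data_pairs := by
  intro data symmetric _ _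
  exact take_data_pairs_eq_alt data symmetric
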